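-- pv_equiv track=rewrite | github.com/BrianLusina/PythonSnips | bit_manipulation/sum_two_integers/__init__.py | integer_addition_2
-- ===== SOURCE A (Python) =====
-- def integer_addition_2(a: int, b: int) -> int:
--     mask = 0xFFFFFFFF
--     max_int = 2 ** 31 - 1
--     while b != 0:
--         sum_ = (a ^ b) & mask
--         carry = (a & b) & mask
--         a = sum_
--         b = carry << 1
--     return a if a <= max_int else ~(a ^ mask)
-- ===== SOURCE B (Python) =====
-- def integer_addition_2(a: int, b: int) -> int:
--     s = (a + b) & 0xFFFFFFFF
--     return s if s <= 2 ** 31 - 1 else s - (1 << 32)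
-- ===== Notes on version B (the rewrite author's own statement) =====
-- stated objective: simpler
-- what changed: Replaces the carry-propagation while-loop (XOR/AND/shift until the carry dies) by one closed-form expression: the masked sum (a+b) & 0xFFFFFFFF followed by the same two's-complement sign correction.
import Mathlib
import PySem

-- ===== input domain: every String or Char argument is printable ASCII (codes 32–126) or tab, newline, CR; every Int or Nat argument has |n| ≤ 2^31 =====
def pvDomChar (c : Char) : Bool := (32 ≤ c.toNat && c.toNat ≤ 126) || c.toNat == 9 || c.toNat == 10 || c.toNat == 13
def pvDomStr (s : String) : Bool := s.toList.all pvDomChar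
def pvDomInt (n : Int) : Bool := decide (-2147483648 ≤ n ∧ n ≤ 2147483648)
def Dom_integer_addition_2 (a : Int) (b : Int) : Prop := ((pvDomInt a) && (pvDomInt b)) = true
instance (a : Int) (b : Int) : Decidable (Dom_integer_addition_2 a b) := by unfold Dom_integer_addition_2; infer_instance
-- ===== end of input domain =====

-- B replaces A's carry-propagation while-loop by the closed-form masked sum (a+b) & 0xFFFFFFFF
-- with the same sign correction; objective: simpler.

-- ===== PORT A =====
-- the while-loop; the fuel 40 is only a totality guard (the proof below shows the loop
-- exits, via the carry-divisibility invariant, well within it)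
def pvLoopA : Nat → Int → Int → Int
  | 0, a, _ => a
  | fuel+1, a, b =>
    if b ≠ 0 then
      pvLoopA fuel (PySem.Int.band (PySem.Int.bxor a b) 4294967295)
        ((PySem.Int.band (PySem.Int.band a b) 4294967295) <<< (1 : Nat))
    else a

def integer_addition_2 (a : Int) (b : Int) : Int :=
  let r := pvLoopA 40 a b
  if r ≤ 2147483647 then r else Int.not (PySem.Int.bxor r 4294967295)

-- ===== PORT B =====
def integer_addition_2_alt (a : Int) (b : Int) : Int :=
  let s := PySem.Int.band (a + b) 4294967295
  if s ≤ 2147483647 then s else s - 4294967296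

-- ===== PRECONDITION & SPEC =====
def Spec_integer_addition_2 (a : Int) (b : Int) (out : Int) : Prop := out = integer_addition_2_alt a b
instance (a : Int) (b : Int) (out : Int) : Decidable (Spec_integer_addition_2 a b out) := by unfold Spec_integer_addition_2; infer_instance

-- ===== CLAIM (what is proved, stated in full; the proofs are below) =====
def Claim_equal_integer_addition_2 : Prop := ∀ (a : Int) (b : Int), Dom_integer_addition_2 a b → Spec_integer_addition_2 a b (integer_addition_2 a b)

-- ===== LEMMAS AND PROOFS =====

-- a + b = (a XOR b) + 2*(a AND b) over ℕ
theorem pv_nat_xor_and (a : Nat) : ∀ b : Nat, (a ^^^ b) + 2 * (a &&& b) = a + b := by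
  induction a using Nat.strong_induction_on with
  | _ a IH =>
    intro b
    rcases Nat.eq_zero_or_pos a with ha | ha
    · simp [ha]
    have hIH := IH (a / 2) (Nat.div_lt_self ha (by omega)) (b / 2)
    have hx : (a ^^^ b) = 2 * ((a / 2) ^^^ (b / 2)) + ((a % 2) ^^^ (b % 2)) := by
      have h1 := Nat.div_add_mod (a ^^^ b) 2
      have h2 : (a ^^^ b) % 2 = (a % 2) ^^^ (b % 2) := by
        have := @Nat.xor_mod_two_pow a b 1
        simpa using this
      rw [Nat.xor_div_two] at h1
      omega
    have hn : (a &&& b) = 2 * ((a / 2) &&& (b / 2)) + ((a % 2) &&& (b % 2)) := by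
      have h1 := Nat.div_add_mod (a &&& b) 2
      have h2 : (a &&& b) % 2 = (a % 2) &&& (b % 2) := by
        have := @Nat.and_mod_two_pow a b 1
        simpa using this
      rw [Nat.and_div_two] at h1
      omega
    have hda := Nat.div_add_mod a 2
    have hdb := Nat.div_add_mod b 2
    have ha2 : a % 2 = 0 ∨ a % 2 = 1 := Nat.mod_two_eq_zero_or_one a
    have hb2 : b % 2 = 0 ∨ b % 2 = 1 := Nat.mod_two_eq_zero_or_one b
    rcases ha2 with h | h <;> rcases hb2 with h' | h' <;>
      rw [h, h'] at hx hn <;>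
      simp only [show ((0:Nat) ^^^ 0) = 0 from rfl, show ((0:Nat) ^^^ 1) = 1 from rfl,
        show ((1:Nat) ^^^ 0) = 1 from rfl, show ((1:Nat) ^^^ 1) = 0 from rfl,
        show ((0:Nat) &&& 0) = 0 from rfl, show ((0:Nat) &&& 1) = 0 from rfl,
        show ((1:Nat) &&& 0) = 0 from rfl, show ((1:Nat) &&& 1) = 1 from rfl] at hx hn <;>
      omega

-- a + b = (a OR b) + (a AND b) over ℕ
theorem pv_nat_or_and (a : Nat) : ∀ b : Nat, (a ||| b) + (a &&& b) = a + b := by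
  induction a using Nat.strong_induction_on with
  | _ a IH =>
    intro b
    rcases Nat.eq_zero_or_pos a with ha | ha
    · simp [ha]
    have hIH := IH (a / 2) (Nat.div_lt_self ha (by omega)) (b / 2)
    have hx : (a ||| b) = 2 * ((a / 2) ||| (b / 2)) + ((a % 2) ||| (b % 2)) := by
      have h1 := Nat.div_add_mod (a ||| b) 2
      have h2 : (a ||| b) % 2 = (a % 2) ||| (b % 2) := by
        have := @Nat.or_mod_two_pow a b 1
        simpa using this
      rw [Nat.or_div_two] at h1
      omega
    have hn : (a &&& b) = 2 * ((a / 2) &&& (b / 2)) + ((a % 2) &&& (b % 2)) := by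
      have h1 := Nat.div_add_mod (a &&& b) 2
      have h2 : (a &&& b) % 2 = (a % 2) &&& (b % 2) := by
        have := @Nat.and_mod_two_pow a b 1
        simpa using this
      rw [Nat.and_div_two] at h1
      omega
    have hda := Nat.div_add_mod a 2
    have hdb := Nat.div_add_mod b 2
    have ha2 : a % 2 = 0 ∨ a % 2 = 1 := Nat.mod_two_eq_zero_or_one a
    have hb2 : b % 2 = 0 ∨ b % 2 = 1 := Nat.mod_two_eq_zero_or_one b
    rcases ha2 with h | h <;> rcases hb2 with h' | h' <;>
      rw [h, h'] at hx hn <;>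
      simp only [show ((0:Nat) ||| 0) = 0 from rfl, show ((0:Nat) ||| 1) = 1 from rfl,
        show ((1:Nat) ||| 0) = 1 from rfl, show ((1:Nat) ||| 1) = 1 from rfl,
        show ((0:Nat) &&& 0) = 0 from rfl, show ((0:Nat) &&& 1) = 0 from rfl,
        show ((1:Nat) &&& 0) = 0 from rfl, show ((1:Nat) &&& 1) = 1 from rfl] at hx hn <;>
      omega

-- x & 0xFFFFFFFF is x mod 2^32, for every integer x
theorem pv_band_mask (x : Int) : PySem.Int.band x 4294967295 = x % 4294967296 := by
  have hm : ((4294967295:Int)).toNat = 4294967295 := rfl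
  rcases (show 0 ≤ x ∨ x < 0 by omega) with hx | hx
  · rw [PySem.Int.band_of_nonneg hx (by norm_num), hm]
    have h2 : (x.toNat &&& 4294967295) = x.toNat % 4294967296 := by
      have := Nat.and_two_pow_sub_one_eq_mod x.toNat 32
      norm_num at this
      exact this
    rw [h2]
    omega
  · unfold PySem.Int.band
    rw [if_neg (not_le.mpr hx), if_pos (by norm_num : (0:Int) ≤ 4294967295), hm]
    have h2 : ∀ n : Nat, (4294967295 &&& n) = n % 4294967296 := by
      intro n
      rw [Nat.and_comm]
      have := Nat.and_two_pow_sub_one_eq_mod n 32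
      norm_num at this
      exact this
    rw [h2]
    omega

-- (a XOR b) + 2*(a AND b) = a + b over ℤ with Python bit semantics
theorem pv_bxor_band (a b : Int) : PySem.Int.bxor a b + 2 * PySem.Int.band a b = a + b := by
  rcases (show 0 ≤ a ∨ a < 0 by omega) with ha | ha <;> rcases (show 0 ≤ b ∨ b < 0 by omega) with hb | hb
  · rw [PySem.Int.bxor_of_nonneg ha hb, PySem.Int.band_of_nonneg ha hb]
    have h1 := pv_nat_xor_and a.toNat b.toNat
    omega
  · unfold PySem.Int.bxor PySem.Int.band
    rw [if_pos ha, if_pos ha, if_neg (not_le.mpr hb), if_neg (not_le.mpr hb)]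
    have h1 := pv_nat_xor_and a.toNat (-b - 1).toNat
    have h2 : (a.toNat &&& (-b - 1).toNat) ≤ a.toNat := Nat.and_le_left
    omega
  · unfold PySem.Int.bxor PySem.Int.band
    rw [if_neg (not_le.mpr ha), if_neg (not_le.mpr ha), if_pos hb, if_pos hb]
    have h1 := pv_nat_xor_and b.toNat (-a - 1).toNat
    have h2 : (b.toNat &&& (-a - 1).toNat) ≤ b.toNat := Nat.and_le_left
    have h3 : ((-a - 1).toNat ^^^ b.toNat) = (b.toNat ^^^ (-a - 1).toNat) := Nat.xor_comm _ _
    omega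
  · unfold PySem.Int.bxor PySem.Int.band
    rw [if_neg (not_le.mpr ha), if_neg (not_le.mpr ha), if_neg (not_le.mpr hb), if_neg (not_le.mpr hb)]
    have h1 := pv_nat_xor_and (-a - 1).toNat (-b - 1).toNat
    have h2 := pv_nat_or_and (-a - 1).toNat (-b - 1).toNat
    omega

theorem pv_shiftl_one (x : Int) (h : 0 ≤ x) : x <<< (1 : Nat) = 2 * x := by
  obtain ⟨n, rfl⟩ := Int.eq_ofNat_of_zero_le h
  have h1 : ((n : Int)) <<< (1 : Nat) = ((n <<< 1 : Nat) : Int) := rfl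
  rw [h1, Nat.shiftLeft_eq]
  push_cast
  ring

-- the ~(r ^ mask) sign correction equals r - 2^32 on [0, 2^32)
theorem pv_not_xor_mask (r : Int) (h0 : 0 ≤ r) (h1 : r < 4294967296) :
    Int.not (PySem.Int.bxor r 4294967295) = r - 4294967296 := by
  have hm : ((4294967295:Int)).toNat = 4294967295 := rfl
  rw [PySem.Int.bxor_of_nonneg h0 (by norm_num), hm]
  have hand : (r.toNat &&& 4294967295) = r.toNat := by
    have := @Nat.and_two_pow_sub_one_of_lt_two_pow 32 r.toNat (by norm_num; omega)
    norm_num at this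
    exact this
  have hxor : (r.toNat ^^^ 4294967295) = 4294967295 - r.toNat := by
    have := pv_nat_xor_and r.toNat 4294967295
    rw [hand] at this
    omega
  rw [hxor]
  have h2 : Int.not (((4294967295 - r.toNat : Nat) : Int)) = Int.negSucc (4294967295 - r.toNat) := rfl
  rw [h2, Int.negSucc_eq]
  omega

-- the loop invariant: once the state is normalised (a ∈ [0,2^32), b ∈ [0,2^33) divisible by 2^k),
-- the loop computes (a+b) mod 2^32 within the remaining fuel
theorem pv_loop_eq (f : Nat) : ∀ (k : Nat) (a b : Int), 0 ≤ a → a < 4294967296 → 0 ≤ b →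
    b < 8589934592 → ((2:Int)^k ∣ b) → 33 ≤ f + k →
    pvLoopA f a b = (a + b) % 4294967296 := by
  induction f with
  | zero =>
    intro k a b ha1 ha2 hb1 hb2 hdvd hf
    have hb0 : b = 0 := by
      rcases Int.lt_or_le 0 b with h | h
      · have h1 : (2:Int)^k ≤ b := Int.le_of_dvd h hdvd
        have h2 : (2:Int)^33 ≤ (2:Int)^k := by
          apply pow_le_pow_right₀ (by norm_num) (by omega)
        norm_num at h2
        omega
      · omega
    subst hb0
    show a = (a + 0) % 4294967296
    omega
  | succ f IH =>
    intro k a b ha1 ha2 hb1 hb2 hdvd hf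
    by_cases hb : b = 0
    · subst hb
      show (if (0:Int) ≠ 0 then _ else a) = (a + 0) % 4294967296
      rw [if_neg (by simp)]
      omega
    · have hk : k ≤ 32 := by
        by_contra hk
        have h1 : (2:Int)^k ≤ b := Int.le_of_dvd (by omega) hdvd
        have h2 : (2:Int)^33 ≤ (2:Int)^k := by
          apply pow_le_pow_right₀ (by norm_num) (by omega)
        norm_num at h2
        omega
      show (if b ≠ 0 then pvLoopA f (PySem.Int.band (PySem.Int.bxor a b) 4294967295)
            ((PySem.Int.band (PySem.Int.band a b) 4294967295) <<< (1:Nat)) else a) = _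
      rw [if_pos hb]
      set X := PySem.Int.bxor a b with hX
      set Y := PySem.Int.band a b with hY
      have hXY : X + 2 * Y = a + b := pv_bxor_band a b
      have ha' : PySem.Int.band X 4294967295 = X % 4294967296 := pv_band_mask X
      have hb' : PySem.Int.band Y 4294967295 = Y % 4294967296 := pv_band_mask Y
      have hbnn : (0:Int) ≤ Y % 4294967296 := Int.emod_nonneg Y (by norm_num)
      have hshift : (Y % 4294967296) <<< (1:Nat) = 2 * (Y % 4294967296) :=
        pv_shiftl_one _ hbnn
      rw [ha', hb', hshift]
      -- divisibility of the new carry by 2^(k+1)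
      have hdvdY : (2:Int)^k ∣ Y := by
        have hYv : Y = ((a.toNat &&& b.toNat : Nat) : Int) := by
          rw [hY, PySem.Int.band_of_nonneg ha1 hb1]
        have hbv : b = ((b.toNat : Nat) : Int) := by omega
        have hBdvd : (2^k : Nat) ∣ b.toNat := by
          have h1 : ((2^k : Nat) : Int) ∣ ((b.toNat : Nat) : Int) := by
            push_cast
            rw [← hbv]
            exact hdvd
          exact_mod_cast h1
        have hB0 : b.toNat % 2^k = 0 := Nat.eq_zero_of_dvd_of_lt hBdvd |> fun _ => Nat.mod_eq_zero_of_dvd hBdvd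
        have h1 : (a.toNat &&& b.toNat) % 2^k = 0 := by
          rw [Nat.and_mod_two_pow, hB0, Nat.and_zero]
        have h2 : (2^k : Nat) ∣ (a.toNat &&& b.toNat) := Nat.dvd_of_mod_eq_zero h1
        rw [hYv]
        exact_mod_cast h2
      have hdvd' : (2:Int)^(k+1) ∣ 2 * (Y % 4294967296) := by
        have h32 : (2:Int)^k ∣ 4294967296 := by
          have := pow_dvd_pow (2:Int) hk
          norm_num at this
          exact this
        have hYm : (2:Int)^k ∣ Y % 4294967296 := by
          rw [Int.emod_def]
          exact dvd_sub hdvdY (Dvd.dvd.mul_right h32 _)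
        rcases hYm with ⟨c, hc⟩
        exact ⟨c, by rw [hc]; ring⟩
      have hres := IH (k+1) (X % 4294967296) (2 * (Y % 4294967296))
        (Int.emod_nonneg X (by norm_num))
        (Int.emod_lt_of_pos X (by norm_num))
        (by omega)
        (by have := Int.emod_lt_of_pos Y (show (0:Int) < 4294967296 by norm_num); omega)
        hdvd'
        (by omega)
      rw [hres]
      omega

-- unpack Dom to plain bounds
theorem pv_dom_bounds (a b : Int) (h : Dom_integer_addition_2 a b) :
    -2147483648 ≤ a ∧ a ≤ 2147483648 ∧ -2147483648 ≤ b ∧ b ≤ 2147483648 := by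
  unfold Dom_integer_addition_2 pvDomInt at h
  simp only [Bool.and_eq_true, decide_eq_true_eq] at h
  exact ⟨h.1.1, h.1.2, h.2.1, h.2.2⟩

-- ===== VERDICT (by name: the statement is the Claim_ definition above) =====
theorem integer_addition_2_spec : Claim_equal_integer_addition_2 := by
  intro a b hdom
  obtain ⟨ha1, ha2, hb1, hb2⟩ := pv_dom_bounds a b hdom
  unfold Spec_integer_addition_2 integer_addition_2 integer_addition_2_alt
  show (if pvLoopA 40 a b ≤ 2147483647 then pvLoopA 40 a b
        else Int.not (PySem.Int.bxor (pvLoopA 40 a b) 4294967295)) =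
       (if PySem.Int.band (a + b) 4294967295 ≤ 2147483647 then PySem.Int.band (a + b) 4294967295
        else PySem.Int.band (a + b) 4294967295 - 4294967296)
  rw [pv_band_mask (a + b)]
  by_cases hb : b = 0
  · subst hb
    have hloop : pvLoopA 40 a 0 = a := by
      show (if (0:Int) ≠ 0 then _ else a) = a
      rw [if_neg (by simp)]
    rw [hloop]
    have hsm : (0:Int) ≤ (a + 0) % 4294967296 := Int.emod_nonneg _ (by norm_num)
    have hsl : (a + 0) % 4294967296 < 4294967296 := Int.emod_lt_of_pos _ (by norm_num)
    split_ifs with h1 h2 h2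
    · omega
    · omega
    · rw [pv_not_xor_mask a (by omega) (by omega)]
      omega
    · rw [pv_not_xor_mask a (by omega) (by omega)]
      omega
  · -- one manual loop step normalises the state, then the invariant applies
    have hstep : pvLoopA 40 a b = pvLoopA 39 (PySem.Int.band (PySem.Int.bxor a b) 4294967295)
        ((PySem.Int.band (PySem.Int.band a b) 4294967295) <<< (1:Nat)) := by
      show (if b ≠ 0 then _ else a) = _
      rw [if_pos hb]
    rw [hstep]
    set X := PySem.Int.bxor a b with hX
    set Y := PySem.Int.band a b with hY
    have hXY : X + 2 * Y = a + b := pv_bxor_band a b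
    have hbnn : (0:Int) ≤ Y % 4294967296 := Int.emod_nonneg Y (by norm_num)
    rw [pv_band_mask X, pv_band_mask Y, pv_shiftl_one _ hbnn]
    have hloop := pv_loop_eq 39 1 (X % 4294967296) (2 * (Y % 4294967296))
      (Int.emod_nonneg X (by norm_num))
      (Int.emod_lt_of_pos X (by norm_num))
      (by omega)
      (by have := Int.emod_lt_of_pos Y (show (0:Int) < 4294967296 by norm_num); omega)
      ⟨Y % 4294967296, by ring⟩
      (by omega)
    rw [hloop]
    have hr : (X % 4294967296 + 2 * (Y % 4294967296)) % 4294967296 = (a + b) % 4294967296 := by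
      omega
    rw [hr]
    have hsm : (0:Int) ≤ (a + b) % 4294967296 := Int.emod_nonneg _ (by norm_num)
    have hsl : (a + b) % 4294967296 < 4294967296 := Int.emod_lt_of_pos _ (by norm_num)
    split_ifs with h1
    · rfl
    · rw [pv_not_xor_mask _ (by omega) (by omega)]
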